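-- pv_equiv track=rewrite | github.com/siva-dataworker/hacathoncarenavigator | backend/api/ai_service.py | count_followup_questions
-- ===== SOURCE A (Python) =====
-- def count_followup_questions(messages):
--     """
--     Count how many follow-up questions the agent has asked about symptoms
--
--     Args:
--         messages: List of conversation messages
--
--     Returns:
--         Number of follow-up questions asked
--     """
--     count = 0
--     user_mentioned_symptoms = False
--
--     for msg in messages:
--         if msg['role'] == 'user' and not user_mentioned_symptoms:
--             # First user message with symptoms
--             user_mentioned_symptoms = True
--         elif msg['role'] == 'assistant' and user_mentioned_symptoms:
--             # Count questions after symptoms mentioned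
--             if '?' in msg['content'] and not any(word in msg['content'].lower() for word in ['when would you', 'name and phone', 'what\'s your name']):
--                 count += 1
--
--     return count
-- ===== SOURCE B (Python) =====
-- def count_followup_questions(messages):
--     # Arithmetic decomposition: count qualifying assistant questions in the
--     # WHOLE conversation, then subtract those occurring strictly before the
--     # first user message.  No flag, no suffix: total - prefix.
--     excluded = ['when would you', 'name and phone', "what's your name"]
--
--     def asks(msg):
--         return (msg['role'] == 'assistant'
--                 and '?' in msg['content']
--                 and not any(w in msg['content'].lower() for w in excluded))
--
--     prefix = []
--     for m in messages:
--         if m['role'] == 'user':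
--             break
--         prefix.append(m)
--     return sum(map(asks, messages)) - sum(map(asks, prefix))
-- ===== Notes on version B (the rewrite author's own statement) =====
-- stated objective: alternative
-- what changed: Replaces A's single stateful pass with a seen-user flag by an arithmetic decomposition: count qualifying assistant questions over the whole list and subtract the count over the prefix before the first user message.
-- outside the precondition, e.g. on count_followup_questions([{'role': 'assistant'}, {'role': 'user'}]): A returns 0, B raises KeyError
import Mathlib
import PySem

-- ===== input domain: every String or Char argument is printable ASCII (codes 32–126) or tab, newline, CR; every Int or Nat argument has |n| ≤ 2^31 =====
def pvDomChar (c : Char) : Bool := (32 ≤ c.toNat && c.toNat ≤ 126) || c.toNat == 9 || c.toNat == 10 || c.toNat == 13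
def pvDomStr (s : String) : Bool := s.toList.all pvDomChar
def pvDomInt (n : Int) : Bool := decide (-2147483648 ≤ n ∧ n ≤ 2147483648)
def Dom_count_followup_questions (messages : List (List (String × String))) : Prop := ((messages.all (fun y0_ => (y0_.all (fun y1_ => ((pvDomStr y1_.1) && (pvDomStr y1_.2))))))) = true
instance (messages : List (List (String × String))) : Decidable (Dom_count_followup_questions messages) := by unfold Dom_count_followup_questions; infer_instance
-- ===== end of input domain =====

-- B replaces A's stateful flag pass by an arithmetic decomposition: total count
-- of qualifying assistant questions minus the count over the prefix before the
-- first user message; objective: alternative (same cost).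

-- ===== PORT A =====
def pvExcluded : List String := ["when would you", "name and phone", "what's your name"]

def cfqStep (st : Int × Bool) (msg : List (String × String)) : Int × Bool :=
  if msg.lookup "role" == some "user" && !st.2 then (st.1, true)
  else if msg.lookup "role" == some "assistant" && st.2 then
    match msg.lookup "content" with
    | some c =>
        if PySem.Str.isIn "?" c &&
           !(pvExcluded.any (fun w => PySem.Str.isIn w (PySem.Str.lower c))) then
          (st.1 + 1, st.2)
        else st
    | none => st  -- Python raises KeyError here; excluded by Pre_
  else st

def count_followup_questions (messages : List (List (String × String))) : Int :=
  (messages.foldl cfqStep (0, false)).1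

-- ===== PORT B =====
def cfqAsks (msg : List (String × String)) : Bool :=
  msg.lookup "role" == some "assistant" &&
  (match msg.lookup "content" with
   | some c =>
       PySem.Str.isIn "?" c &&
       !(pvExcluded.any (fun w => PySem.Str.isIn w (PySem.Str.lower c)))
   | none => false)  -- Python raises KeyError here; excluded by Pre_

def count_followup_questions_alt (messages : List (List (String × String))) : Int :=
  ((messages.countP cfqAsks : Nat) : Int) -
    (((messages.takeWhile (fun m => !(m.lookup "role" == some "user"))).countP cfqAsks : Nat) : Int)

-- ===== PRECONDITION & SPEC =====
-- Pre_ excludes the inputs on which Python A raises KeyError (a message without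
-- a 'role' key, or an assistant message after the first user message without a
-- 'content' key), and additionally assistant messages without a 'content' key
-- that precede the first user message: A returns there (they never reach its
-- content access) but B's asks naturally raises KeyError on them.
def Pre_count_followup_questions (messages : List (List (String × String))) : Prop :=
  (∀ msg ∈ messages, (msg.lookup "role").isSome) ∧
  (∀ msg ∈ messages, msg.lookup "role" = some "assistant" → (msg.lookup "content").isSome)
instance (messages : List (List (String × String))) : Decidable (Pre_count_followup_questions messages) := by
  unfold Pre_count_followup_questions; infer_instance

def pvWitness_count_followup_questions : (List (List (String × String))) :=
  [[("role", "user"), ("content", "I have a headache")],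
   [("role", "assistant"), ("content", "How long has it hurt?")]]

def Spec_count_followup_questions (messages : List (List (String × String))) (out : Int) : Prop := out = count_followup_questions_alt messages
instance (messages : List (List (String × String))) (out : Int) : Decidable (Spec_count_followup_questions messages out) := by unfold Spec_count_followup_questions; infer_instance

-- ===== CLAIM (what is proved, stated in full; the proofs are below) =====
def Claim_equal_count_followup_questions : Prop := ∀ (messages : List (List (String × String))), Dom_count_followup_questions messages → Pre_count_followup_questions messages → Spec_count_followup_questions messages (count_followup_questions messages)

-- ===== LEMMAS AND PROOFS =====

-- Once the flag is set, one step of A's loop adds 1 exactly when the message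
-- is a qualifying assistant question, and the flag stays set.
theorem cfqStep_true (c : Int) (m : List (String × String)) :
    cfqStep (c, true) m = (c + (if cfqAsks m then 1 else 0), true) := by
  cases hr : m.lookup "role" with
  | none => simp [cfqStep, cfqAsks, hr]
  | some r =>
    by_cases ha : r = "assistant"
    · subst ha
      cases hc : m.lookup "content" with
      | none => simp [cfqStep, cfqAsks, hr, hc]
      | some s =>
        simp [cfqStep, cfqAsks, hr, hc]
        split_ifs <;> simp
    · simp [cfqStep, cfqAsks, hr, ha]

-- After the flag is set, A's loop adds exactly the count of qualifying
-- assistant messages and the flag stays set.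
theorem cfq_foldl_true (t : List (List (String × String))) :
    ∀ c : Int, t.foldl cfqStep (c, true) = (c + (t.countP cfqAsks : Nat), true) := by
  induction t with
  | nil => intro c; simp
  | cons m t ih =>
    intro c
    rw [List.foldl_cons, cfqStep_true, ih, List.countP_cons]
    by_cases h : cfqAsks m = true
    · simp [h]; push_cast; ring
    · simp [h]

-- A message whose role is "user" is never a qualifying assistant question.
theorem cfqAsks_user (m : List (String × String)) (hr : m.lookup "role" = some "user") :
    cfqAsks m = false := by
  simp [cfqAsks, hr]

theorem cfq_main (messages : List (List (String × String))) :
    count_followup_questions messages = count_followup_questions_alt messages := by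
  induction messages with
  | nil => rfl
  | cons m t ih =>
    by_cases hu : (m.lookup "role" == some "user") = true
    · have hr : m.lookup "role" = some "user" := by simpa using hu
      have hstep : cfqStep (0, false) m = (0, true) := by simp [cfqStep, hr]
      simp only [count_followup_questions, List.foldl_cons, hstep, cfq_foldl_true]
      simp [count_followup_questions_alt, List.takeWhile_cons, hu,
        List.countP_cons, cfqAsks_user m hr]
    · have hstep : cfqStep (0, false) m = (0, false) := by
        cases hr : m.lookup "role" with
        | none => simp [cfqStep, hr]
        | some r =>
          have : ¬ r = "user" := by intro h; subst h; simp [hr] at hu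
          simp [cfqStep, hr, this]
      have hu' : (!(m.lookup "role" == some "user")) = true := by simpa using hu
      simp only [count_followup_questions, List.foldl_cons, hstep]
      have halt : count_followup_questions_alt (m :: t) = count_followup_questions_alt t := by
        simp only [count_followup_questions_alt, List.takeWhile_cons, hu', if_true,
          List.countP_cons]
        by_cases h : cfqAsks m = true <;> simp [h]
      rw [halt, ← ih]; rfl

-- ===== VERDICT (by name: the statement is the Claim_ definition above) =====
theorem count_followup_questions_spec : Claim_equal_count_followup_questions := by
  intro messages _ _
  unfold Spec_count_followup_questions
  exact cfq_main messages
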